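-- pv_equiv track=rewrite | github.com/kimjune01/june.kim | worklog/matroid_exchange2.py | temporal_neighborhoods_3hop
-- ===== SOURCE A (Python) =====
-- from collections import defaultdict
--
-- def temporal_neighborhoods_3hop(n, timestamps):
--     """
--     3-hop: i -> c1 at t1, e1 -> c2 at t2, e2 -> j at t3, t1 < t2 < t3.
--     Even more restrictive — fewer reachable collectors.
--     """
--     neighborhoods = {}
--     # Precompute: for each (emitter, time), what collectors are available after time t
--     send_times = defaultdict(list)  # emitter -> [(time, collector)]
--     for (e, c), t in timestamps.items():
--         send_times[e].append((t, c))
--     for e in send_times: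
--         send_times[e].sort()
--
--     for i in range(n):
--         reachable = set()
--         for c1 in range(n):
--             if (i, c1) not in timestamps:
--                 continue
--             t1 = timestamps[(i, c1)]
--             # Second hop: any emitter e1 sends to c2 at t2 > t1
--             for e1 in range(n):
--                 for c2 in range(n):
--                     if (e1, c2) not in timestamps:
--                         continue
--                     t2 = timestamps[(e1, c2)]
--                     if t2 <= t1:
--                         continue
--                     # Third hop: any emitter e2 sends to j at t3 > t2
--                     for e2 in range(n):
--                         for j in range(n):
--                             if (e2, j) not in timestamps:
--                                 continue
--                             t3 = timestamps[(e2, j)]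
--                             if t3 > t2:
--                                 reachable.add(j)
--         neighborhoods[i] = frozenset(reachable)
--     return neighborhoods
-- ===== SOURCE B (Python) =====
-- def temporal_neighborhoods_3hop(n, timestamps):
--     # Build the present-edge index once; then scan edge lists per node with a
--     # running-minimum second-hop cutoff instead of probing the n*n grid per hop.
--     edges = [(e, c, timestamps[(e, c)])
--              for e in range(n) for c in range(n) if (e, c) in timestamps]
--     neighborhoods = {}
--     for i in range(n):
--         reachable = set()
--         cur = None  # smallest second-hop time already fully expanded
--         for (e0, c1, t1) in edges:
--             if e0 != i:
--                 continue
--             for (_, c2, t2) in edges: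
--                 if t2 <= t1 or (cur is not None and t2 >= cur):
--                     continue
--                 cur = t2
--                 for (_, j, t3) in edges:
--                     if t3 > t2:
--                         reachable.add(j)
--         neighborhoods[i] = frozenset(reachable)
--     return neighborhoods
-- ===== Notes on version B (the rewrite author's own statement) =====
-- stated objective: faster
-- what changed: B precomputes the in-range edge list once and, per start node, scans edge lists while keeping a running minimum of the second-hop time so that third-hop scans whose threshold is not a new minimum are skipped entirely, instead of A's five nested range loops re-probing the whole n x n grid for every hop.
import Mathlib
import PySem

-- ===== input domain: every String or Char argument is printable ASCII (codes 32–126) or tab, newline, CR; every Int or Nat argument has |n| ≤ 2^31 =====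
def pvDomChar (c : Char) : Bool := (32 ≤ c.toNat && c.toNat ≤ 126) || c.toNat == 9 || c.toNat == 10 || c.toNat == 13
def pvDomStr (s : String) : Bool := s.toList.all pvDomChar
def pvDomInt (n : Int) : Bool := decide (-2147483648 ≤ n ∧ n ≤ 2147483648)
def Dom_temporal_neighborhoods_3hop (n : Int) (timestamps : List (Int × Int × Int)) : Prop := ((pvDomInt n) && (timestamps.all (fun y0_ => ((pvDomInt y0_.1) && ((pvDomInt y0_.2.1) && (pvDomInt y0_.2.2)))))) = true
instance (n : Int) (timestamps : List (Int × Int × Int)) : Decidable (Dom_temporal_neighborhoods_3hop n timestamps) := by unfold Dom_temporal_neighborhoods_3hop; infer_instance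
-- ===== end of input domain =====

-- B replaces A's per-hop membership probing over the full n×n grid by one precomputed
-- edge index scanned per node with a running-minimum second-hop cutoff (faster; same values).
-- The timestamps dict is modelled as an association list (first match wins); both ports use
-- the same first-match lookup, so the equivalence is total (no Pre_).

-- ===== PORT A =====
-- dict lookup 'timestamps[(e, c)]' / membership test, first match (shared dict model)
def tnLookup (ts : List (Int × Int × Int)) (e c : Int) : Option Int :=
  (ts.find? (fun x => x.1 == e && x.2.1 == c)).map (fun x => x.2.2)

-- innermost loop body: 'if (e2, j) not in timestamps: continue; t3 = …; if t3 > t2: reachable.add(j)'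
def tnBody3 (ts : List (Int × Int × Int)) (t2 : Int) (s : PySem.Set Int) (e2 j : Int) : PySem.Set Int :=
  match tnLookup ts e2 j with
  | none => s
  | some t3 => if t3 > t2 then PySem.Set.add s j else s

-- 'for e2 in range(n): for j in range(n): …'
def tnHop3A (n : Int) (ts : List (Int × Int × Int)) (t2 : Int) (s : PySem.Set Int) : PySem.Set Int :=
  (PySem.List.pyRange 0 n).foldl (fun s e2 =>
    (PySem.List.pyRange 0 n).foldl (fun s j => tnBody3 ts t2 s e2 j) s) s

-- middle loop body: 'if (e1, c2) not in timestamps: continue; t2 = …; if t2 <= t1: continue; <third hop>'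
def tnBody2 (n : Int) (ts : List (Int × Int × Int)) (t1 : Int) (s : PySem.Set Int) (e1 c2 : Int) : PySem.Set Int :=
  match tnLookup ts e1 c2 with
  | none => s
  | some t2 => if t2 ≤ t1 then s else tnHop3A n ts t2 s

-- 'for e1 in range(n): for c2 in range(n): …'
def tnHop2A (n : Int) (ts : List (Int × Int × Int)) (t1 : Int) (s : PySem.Set Int) : PySem.Set Int :=
  (PySem.List.pyRange 0 n).foldl (fun s e1 =>
    (PySem.List.pyRange 0 n).foldl (fun s c2 => tnBody2 n ts t1 s e1 c2) s) s

-- first-hop body: 'if (i, c1) not in timestamps: continue; t1 = …; <second hop>'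
def tnBody1 (n : Int) (ts : List (Int × Int × Int)) (i : Int) (s : PySem.Set Int) (c1 : Int) : PySem.Set Int :=
  match tnLookup ts i c1 with
  | none => s
  | some t1 => tnHop2A n ts t1 s

-- 'reachable = set(); for c1 in range(n): …'
def tnHop1A (n : Int) (ts : List (Int × Int × Int)) (i : Int) : PySem.Set Int :=
  (PySem.List.pyRange 0 n).foldl (fun s c1 => tnBody1 n ts i s c1) PySem.Set.empty

-- A's 'send_times' precompute is dead code (built, sorted, never read); it does not affect the result.
def temporal_neighborhoods_3hop (n : Int) (timestamps : List (Int × Int × Int)) : List (Int × List Int) :=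
  (PySem.List.pyRange 0 n).foldl (fun acc i => acc ++ [(i, tnHop1A n timestamps i)]) []

-- ===== PORT B =====
-- 'edges = [(e, c, timestamps[(e, c)]) for e in range(n) for c in range(n) if (e, c) in timestamps]'
def tnIndex (n : Int) (ts : List (Int × Int × Int)) : List (Int × Int × Int) :=
  (PySem.List.pyRange 0 n).flatMap (fun e =>
    (PySem.List.pyRange 0 n).filterMap (fun c => (tnLookup ts e c).map (fun t => (e, c, t))))

-- 'for (_, j, t3) in edges: if t3 > t2: reachable.add(j)'
def tnHop3B (edges : List (Int × Int × Int)) (t2 : Int) (s : PySem.Set Int) : PySem.Set Int :=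
  edges.foldl (fun s h => if h.2.2 > t2 then PySem.Set.add s h.2.1 else s) s

-- 'if t2 <= t1 or (cur is not None and t2 >= cur): continue; cur = t2; <inner scan>'
def tnBody2B (edges : List (Int × Int × Int)) (t1 : Int) (p : PySem.Set Int × Option Int)
    (g : Int × Int × Int) : PySem.Set Int × Option Int :=
  if g.2.2 ≤ t1 then p
  else
    match p.2 with
    | none => (tnHop3B edges g.2.2 p.1, some g.2.2)
    | some v => if g.2.2 ≥ v then p else (tnHop3B edges g.2.2 p.1, some g.2.2)

-- 'for (_, c2, t2) in edges: …' (state: reachable set, running minimum cur)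
def tnHop2B (edges : List (Int × Int × Int)) (t1 : Int) (p : PySem.Set Int × Option Int) :
    PySem.Set Int × Option Int :=
  edges.foldl (fun p g => tnBody2B edges t1 p g) p

-- 'reachable = set(); cur = None; for (e0, c1, t1) in edges: if e0 != i: continue; …'
def tnHop1B (edges : List (Int × Int × Int)) (i : Int) : PySem.Set Int × Option Int :=
  edges.foldl (fun p f => if f.1 == i then tnHop2B edges f.2.2 p else p) (PySem.Set.empty, none)

def temporal_neighborhoods_3hop_alt (n : Int) (timestamps : List (Int × Int × Int)) : List (Int × List Int) :=
  let edges := tnIndex n timestamps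
  (PySem.List.pyRange 0 n).foldl (fun acc i => acc ++ [(i, (tnHop1B edges i).1)]) []

-- ===== PRECONDITION & SPEC =====
def Spec_temporal_neighborhoods_3hop (n : Int) (timestamps : List (Int × Int × Int)) (out : List (Int × List Int)) : Prop := out = temporal_neighborhoods_3hop_alt n timestamps
instance (n : Int) (timestamps : List (Int × Int × Int)) (out : List (Int × List Int)) : Decidable (Spec_temporal_neighborhoods_3hop n timestamps out) := by unfold Spec_temporal_neighborhoods_3hop; infer_instance

-- ===== CLAIM (what is proved, stated in full; the proofs are below) =====
def Claim_equal_temporal_neighborhoods_3hop : Prop := ∀ (n : Int) (timestamps : List (Int × Int × Int)), Dom_temporal_neighborhoods_3hop n timestamps → Spec_temporal_neighborhoods_3hop n timestamps (temporal_neighborhoods_3hop n timestamps)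

-- ===== LEMMAS AND PROOFS =====

-- one row of B's edge index: the present edges with emitter x, collectors drawn from l
def tnRow (ts : List (Int × Int × Int)) (x : Int) (l : List Int) : List (Int × Int × Int) :=
  l.filterMap (fun c => (tnLookup ts x c).map (fun t => (x, c, t)))

-- the "already fully expanded up to cur" invariant carried by B's running minimum
def tnInv (L : List (Int × Int × Int)) (s : PySem.Set Int) (cur : Option Int) : Prop :=
  ∀ v, cur = some v → ∀ h ∈ L, h.2.2 > v → h.2.1 ∈ s

theorem tnRow_fst {ts : List (Int × Int × Int)} {x : Int} {l : List Int}
    {h : Int × Int × Int} (hm : h ∈ tnRow ts x l) : h.1 = x := by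
  simp only [tnRow, List.mem_filterMap] at hm
  obtain ⟨c, -, hc⟩ := hm
  cases ht : tnLookup ts x c with
  | none => simp [ht] at hc
  | some t => simp [ht] at hc; simp [← hc]

theorem tnFoldlFlatMap {σ : Type} (g : Int → List (Int × Int × Int)) (f : σ → (Int × Int × Int) → σ) :
    ∀ (l : List Int) (s : σ), (l.flatMap g).foldl f s = l.foldl (fun s x => (g x).foldl f s) s := by
  intro l
  induction l with
  | nil => intro s; rfl
  | cons x tl ih => intro s; simp [List.flatMap_cons, List.foldl_append, ih]

-- inner loop over j: a range scan with lookup is a scan of the corresponding index row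
theorem tnRow3 (ts : List (Int × Int × Int)) (t2 : Int) (x : Int) :
    ∀ (l : List Int) (s : PySem.Set Int),
      l.foldl (fun s j => tnBody3 ts t2 s x j) s
        = (tnRow ts x l).foldl (fun s h => if h.2.2 > t2 then PySem.Set.add s h.2.1 else s) s := by
  intro l
  induction l with
  | nil => intro s; rfl
  | cons c tl ih =>
    intro s
    rw [List.foldl_cons, ih]
    cases ht : tnLookup ts x c with
    | none => simp [tnRow, ht, tnBody3]
    | some t3 => simp [tnRow, ht, tnBody3]

theorem tnHop3_eq (n : Int) (ts : List (Int × Int × Int)) (t2 : Int) (s : PySem.Set Int) :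
    tnHop3A n ts t2 s = tnHop3B (tnIndex n ts) t2 s := by
  have key : ∀ (lo : List Int) (s : PySem.Set Int),
      lo.foldl (fun s e2 => (PySem.List.pyRange 0 n).foldl (fun s j => tnBody3 ts t2 s e2 j) s) s
        = (lo.flatMap (fun x => tnRow ts x (PySem.List.pyRange 0 n))).foldl
            (fun s h => if h.2.2 > t2 then PySem.Set.add s h.2.1 else s) s := by
    intro lo
    induction lo with
    | nil => intro s; rfl
    | cons x tl ih =>
      intro s
      rw [List.foldl_cons, ih, tnRow3, List.flatMap_cons, List.foldl_append]
  unfold tnHop3A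
  rw [key (PySem.List.pyRange 0 n) s]
  rfl

theorem tnRow2 (n : Int) (ts : List (Int × Int × Int)) (t1 : Int) (x : Int) :
    ∀ (l : List Int) (s : PySem.Set Int),
      l.foldl (fun s c2 => tnBody2 n ts t1 s x c2) s
        = (tnRow ts x l).foldl (fun s g => if g.2.2 ≤ t1 then s else tnHop3A n ts g.2.2 s) s := by
  intro l
  induction l with
  | nil => intro s; rfl
  | cons c tl ih =>
    intro s
    rw [List.foldl_cons, ih]
    cases ht : tnLookup ts x c with
    | none => simp [tnRow, ht, tnBody2]
    | some t2 => simp [tnRow, ht, tnBody2]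

theorem tnHop2_eq (n : Int) (ts : List (Int × Int × Int)) (t1 : Int) (s : PySem.Set Int) :
    tnHop2A n ts t1 s
      = (tnIndex n ts).foldl
          (fun s g => if g.2.2 ≤ t1 then s else tnHop3B (tnIndex n ts) g.2.2 s) s := by
  have key : ∀ (lo : List Int) (s : PySem.Set Int),
      lo.foldl (fun s e1 => (PySem.List.pyRange 0 n).foldl (fun s c2 => tnBody2 n ts t1 s e1 c2) s) s
        = (lo.flatMap (fun x => tnRow ts x (PySem.List.pyRange 0 n))).foldl
            (fun s g => if g.2.2 ≤ t1 then s else tnHop3A n ts g.2.2 s) s := by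
    intro lo
    induction lo with
    | nil => intro s; rfl
    | cons x tl ih =>
      intro s
      rw [List.foldl_cons, ih, tnRow2, List.flatMap_cons, List.foldl_append]
  unfold tnHop2A
  rw [key (PySem.List.pyRange 0 n) s]
  rw [show ((PySem.List.pyRange 0 n).flatMap (fun x => tnRow ts x (PySem.List.pyRange 0 n)))
      = tnIndex n ts from rfl]
  exact PySem.List.foldl_congr_mem _ _ _ _ (by
    intro acc g _
    by_cases h : g.2.2 ≤ t1 <;> simp [h, tnHop3_eq])

theorem tnRow1 (n : Int) (ts : List (Int × Int × Int)) (i : Int) :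
    ∀ (l : List Int) (s : PySem.Set Int),
      l.foldl (fun s c1 => tnBody1 n ts i s c1) s
        = (tnRow ts i l).foldl (fun s f0 => tnHop2A n ts f0.2.2 s) s := by
  intro l
  induction l with
  | nil => intro s; rfl
  | cons c tl ih =>
    intro s
    rw [List.foldl_cons, ih]
    cases ht : tnLookup ts i c with
    | none => simp [tnRow, ht, tnBody1]
    | some t1 => simp [tnRow, ht, tnBody1]

-- membership facts about the inner scan
theorem mem_tnHop3B_of_mem {x : Int} : ∀ (l : List (Int × Int × Int)) (t2 : Int) (s : PySem.Set Int),
    x ∈ s → x ∈ tnHop3B l t2 s := by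
  intro l
  induction l with
  | nil => intro t2 s hx; exact hx
  | cons h tl ih =>
    intro t2 s hx
    simp only [tnHop3B, List.foldl_cons]
    by_cases hc : h.2.2 > t2
    · simp only [if_pos hc]
      exact ih t2 _ ((PySem.Set.mem_add _ _ _).mpr (Or.inl hx))
    · simp only [if_neg hc]; exact ih t2 s hx

theorem mem_tnHop3B_self : ∀ (l : List (Int × Int × Int)) (t2 : Int) (s : PySem.Set Int)
    (h : Int × Int × Int), h ∈ l → h.2.2 > t2 → h.2.1 ∈ tnHop3B l t2 s := by
  intro l
  induction l with
  | nil => intro _ _ _ hm; simp at hm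
  | cons g tl ih =>
    intro t2 s h hm ht
    simp only [tnHop3B, List.foldl_cons]
    rcases List.mem_cons.mp hm with rfl | hm'
    · simp only [if_pos ht]
      exact mem_tnHop3B_of_mem tl t2 _ ((PySem.Set.mem_add _ _ _).mpr (Or.inr rfl))
    · exact ih t2 _ h hm' ht

theorem tnHop3B_noop : ∀ (l : List (Int × Int × Int)) (t2 : Int) (s : PySem.Set Int),
    (∀ h ∈ l, h.2.2 > t2 → h.2.1 ∈ s) → tnHop3B l t2 s = s := by
  intro l
  induction l with
  | nil => intro _ _ _; rfl
  | cons g tl ih =>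
    intro t2 s hmem
    simp only [tnHop3B, List.foldl_cons]
    by_cases hc : g.2.2 > t2
    · rw [if_pos hc, PySem.Set.add_of_mem (hmem g (List.mem_cons_self ..) hc)]
      exact ih t2 s (fun h hm => hmem h (List.mem_cons_of_mem _ hm))
    · rw [if_neg hc]
      exact ih t2 s (fun h hm => hmem h (List.mem_cons_of_mem _ hm))

-- the pruning simulation: B's cur-guarded middle loop computes A's unguarded one
theorem tnSim2 (L : List (Int × Int × Int)) (t1 : Int) :
    ∀ (l : List (Int × Int × Int)) (s : PySem.Set Int) (cur : Option Int), tnInv L s cur →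
      (l.foldl (fun p g => tnBody2B L t1 p g) (s, cur)).1
          = l.foldl (fun s g => if g.2.2 ≤ t1 then s else tnHop3B L g.2.2 s) s
        ∧ tnInv L (l.foldl (fun p g => tnBody2B L t1 p g) (s, cur)).1
            (l.foldl (fun p g => tnBody2B L t1 p g) (s, cur)).2 := by
  intro l
  induction l with
  | nil => intro s cur hinv; exact ⟨rfl, hinv⟩
  | cons g tl ih =>
    intro s cur hinv
    simp only [List.foldl_cons]
    by_cases h1 : g.2.2 ≤ t1
    · simp only [tnBody2B, if_pos h1]
      exact ih s cur hinv
    · simp only [tnBody2B, if_neg h1]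
      cases cur with
      | none =>
        exact ih _ _ (fun v hv h hm hgt => by
          cases hv; exact mem_tnHop3B_self L _ s h hm hgt)
      | some v =>
        by_cases h2 : g.2.2 ≥ v
        · simp only [if_pos h2]
          have hnoop : tnHop3B L g.2.2 s = s :=
            tnHop3B_noop L g.2.2 s (fun h hm hgt => hinv v rfl h hm (lt_of_le_of_lt h2 hgt))
          rw [hnoop]
          exact ih s (some v) hinv
        · simp only [if_neg h2]
          exact ih _ _ (fun w hw h hm hgt => by
            cases hw; exact mem_tnHop3B_self L _ s h hm hgt)

-- lift the simulation through the first-hop loop (cur survives across c1 blocks)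
theorem tnSim1 (n : Int) (ts : List (Int × Int × Int)) :
    ∀ (rs : List (Int × Int × Int)) (s : PySem.Set Int) (cur : Option Int),
      tnInv (tnIndex n ts) s cur →
      (rs.foldl (fun p f0 => tnHop2B (tnIndex n ts) f0.2.2 p) (s, cur)).1
        = rs.foldl (fun s f0 => tnHop2A n ts f0.2.2 s) s := by
  intro rs
  induction rs with
  | nil => intro s cur _; rfl
  | cons f0 tl ih =>
    intro s cur hinv
    simp only [List.foldl_cons]
    obtain ⟨heq, hinv'⟩ := tnSim2 (tnIndex n ts) f0.2.2 (tnIndex n ts) s cur hinv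
    have hfold : tnHop2B (tnIndex n ts) f0.2.2 (s, cur)
        = (tnIndex n ts).foldl (fun p g => tnBody2B (tnIndex n ts) f0.2.2 p g) (s, cur) := rfl
    have h1 : (tnHop2B (tnIndex n ts) f0.2.2 (s, cur)).1 = tnHop2A n ts f0.2.2 s := by
      rw [hfold, heq, ← tnHop2_eq]
    rw [← h1]
    exact ih _ _ hinv'

theorem pyRange_zero_nodup (n : Int) : (PySem.List.pyRange 0 n).Nodup := by
  by_cases hn : 0 ≤ n
  · have hcast : n = ((n.toNat : Nat) : Int) := by omega
    rw [hcast, PySem.List.pyRange_zero_natCast]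
    exact List.Nodup.map (fun a b h => by exact_mod_cast h) List.nodup_range
  · have hemp : PySem.List.pyRange 0 n = [] := by
      apply List.eq_nil_iff_forall_not_mem.mpr
      intro x hx
      have := PySem.List.mem_pyRange_one.mp hx
      omega
    rw [hemp]; exact List.nodup_nil

-- a fold over blocks that act trivially except the block of i collapses to that block
theorem tnSplitFold {σ : Type} (R : Int → List (Int × Int × Int)) (f : σ → (Int × Int × Int) → σ)
    (l1 l2 : List Int) (i : Int) (init : σ)
    (h1 : ∀ x ∈ l1, ∀ s, (R x).foldl f s = s) (h2 : ∀ x ∈ l2, ∀ s, (R x).foldl f s = s) :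
    (l1 ++ i :: l2).foldl (fun s x => (R x).foldl f s) init = (R i).foldl f init := by
  rw [List.foldl_append, List.foldl_cons]
  rw [PySem.List.foldl_congr_mem _ _ (fun acc _ => acc) _ (fun acc x hm => h1 x hm acc),
    PySem.List.foldl_ignore]
  rw [PySem.List.foldl_congr_mem _ _ (fun acc _ => acc) _ (fun acc x hm => h2 x hm acc),
    PySem.List.foldl_ignore]

-- B's outer loop over all edges localizes to the row of emitter i
theorem tnHop1B_localize (n : Int) (ts : List (Int × Int × Int)) (i : Int)
    (hi : i ∈ PySem.List.pyRange 0 n) :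
    tnHop1B (tnIndex n ts) i
      = (tnRow ts i (PySem.List.pyRange 0 n)).foldl
          (fun p f0 => tnHop2B (tnIndex n ts) f0.2.2 p) (PySem.Set.empty, none) := by
  have hskip : ∀ (rs : List (Int × Int × Int)), (∀ h ∈ rs, h.1 ≠ i) →
      ∀ (p : PySem.Set Int × Option Int),
      rs.foldl (fun p f => if f.1 == i then tnHop2B (tnIndex n ts) f.2.2 p else p) p = p := by
    intro rs
    induction rs with
    | nil => intro _ p; rfl
    | cons h tl ih =>
      intro hne p
      rw [List.foldl_cons, if_neg (by simp [hne h (List.mem_cons_self ..)])]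
      exact ih (fun h' hm => hne h' (List.mem_cons_of_mem _ hm)) p
  have hkeep : ∀ (rs : List (Int × Int × Int)), (∀ h ∈ rs, h.1 = i) →
      ∀ (p : PySem.Set Int × Option Int),
      rs.foldl (fun p f => if f.1 == i then tnHop2B (tnIndex n ts) f.2.2 p else p) p
        = rs.foldl (fun p f0 => tnHop2B (tnIndex n ts) f0.2.2 p) p := by
    intro rs
    induction rs with
    | nil => intro _ p; rfl
    | cons h tl ih =>
      intro heq p
      rw [List.foldl_cons, List.foldl_cons, if_pos (by simp [heq h (List.mem_cons_self ..)])]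
      exact ih (fun h' hm => heq h' (List.mem_cons_of_mem _ hm)) _
  obtain ⟨l1, l2, hsplit, hnotm1⟩ := List.eq_append_cons_of_mem hi
  have hnodup : (l1 ++ i :: l2).Nodup := hsplit ▸ pyRange_zero_nodup n
  have hnotm2 : i ∉ l2 := by
    have h2 := (List.nodup_append.mp hnodup).2.1
    exact (List.nodup_cons.mp h2).1
  rw [show tnHop1B (tnIndex n ts) i
      = ((PySem.List.pyRange 0 n).flatMap (fun x => tnRow ts x (PySem.List.pyRange 0 n))).foldl
          (fun p f => if f.1 == i then tnHop2B (tnIndex n ts) f.2.2 p else p)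
          (PySem.Set.empty, none) from rfl]
  rw [tnFoldlFlatMap]
  have hmain := tnSplitFold (fun x => tnRow ts x (PySem.List.pyRange 0 n))
    (fun p f => if f.1 == i then tnHop2B (tnIndex n ts) f.2.2 p else p) l1 l2 i
    (PySem.Set.empty, none)
    (fun x hx s => hskip _ (fun h hm => by
      rw [tnRow_fst hm]; intro hxe; exact hnotm1 (hxe ▸ hx)) s)
    (fun x hx s => hskip _ (fun h hm => by
      rw [tnRow_fst hm]; intro hxe; exact hnotm2 (hxe ▸ hx)) s)
  rw [← hsplit] at hmain
  exact hmain.trans (hkeep _ (fun h hm => tnRow_fst hm) _)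

-- per-node agreement
theorem tnPerNode (n : Int) (ts : List (Int × Int × Int)) (i : Int)
    (hi : i ∈ PySem.List.pyRange 0 n) :
    tnHop1A n ts i = (tnHop1B (tnIndex n ts) i).1 := by
  rw [tnHop1B_localize n ts i hi]
  rw [tnSim1 n ts _ PySem.Set.empty none (fun v hv => by cases hv)]
  unfold tnHop1A
  rw [tnRow1]

-- ===== VERDICT (by name: the statement is the Claim_ definition above) =====
theorem temporal_neighborhoods_3hop_spec : Claim_equal_temporal_neighborhoods_3hop := by
  intro n ts _
  unfold Spec_temporal_neighborhoods_3hop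
  rw [show temporal_neighborhoods_3hop_alt n ts
      = (PySem.List.pyRange 0 n).foldl (fun acc i => acc ++ [(i, (tnHop1B (tnIndex n ts) i).1)]) []
      from rfl]
  unfold temporal_neighborhoods_3hop
  rw [PySem.List.foldl_append_singleton_eq_map, PySem.List.foldl_append_singleton_eq_map]
  simp only [List.nil_append]
  exact List.map_congr_left (fun i hi => by rw [tnPerNode n ts i hi])
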